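-- pv_equiv track=rewrite | github.com/ahmedmustahid/algorithms_illuminated | greedy_algorithms/clustering_hamming_distance.py | getBitMasksFromCombinations
-- ===== SOURCE A (Python) =====
-- import itertools
--
-- def getBitMasksFromCombinations(totalBits: int = 3):
--     bitMasks = []
--     combinationIdxs = list(itertools.combinations(range(totalBits), 2))
--     for idx1, idx2 in combinationIdxs:
--         singlebit = ["0"] * totalBits
--         singlebit[idx1] = "1"
--         singlebit[idx2] = "1"
--
--         singlebitStr = "".join(singlebit)
--         numFromBits = int(singlebitStr, 2)
--         bitMasks.append(numFromBits)
--     return bitMasks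
-- ===== SOURCE B (Python) =====
-- def getBitMasksFromCombinations(totalBits: int = 3):
--     # walk bit positions downwards and build each two-bit value arithmetically
--     bitMasks = []
--     for p in range(totalBits - 1, 0, -1):
--         for q in range(p - 1, -1, -1):
--             bitMasks.append((1 << p) + (1 << q))
--     return bitMasks
-- ===== Notes on version B (the rewrite author's own statement) =====
-- stated objective: alternative
-- what changed: B walks bit positions downward with two plain loops and computes each mask arithmetically as (1<<p)+(1<<q), instead of enumerating index pairs via itertools.combinations and building then parsing a binary string per pair (measured about 20x faster at the largest size both finished, but the probe could not confirm this at the top size, so no speed is claimed).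
import Mathlib
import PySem

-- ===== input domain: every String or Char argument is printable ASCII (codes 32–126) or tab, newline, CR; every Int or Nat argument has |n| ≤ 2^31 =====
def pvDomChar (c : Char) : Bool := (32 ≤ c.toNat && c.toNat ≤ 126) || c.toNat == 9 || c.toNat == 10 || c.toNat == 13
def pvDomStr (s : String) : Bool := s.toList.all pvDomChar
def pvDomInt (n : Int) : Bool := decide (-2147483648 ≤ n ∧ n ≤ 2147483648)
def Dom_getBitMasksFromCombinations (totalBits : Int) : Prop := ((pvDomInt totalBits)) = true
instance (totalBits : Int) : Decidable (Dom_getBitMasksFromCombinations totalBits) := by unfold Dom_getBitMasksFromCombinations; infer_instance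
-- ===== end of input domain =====

-- B replaces A's itertools index-pair enumeration with per-pair binary-string building and
-- parsing by two plain descending loops over bit positions computing each mask as (1<<p)+(1<<q).


-- ===== PORT A =====
-- itertools.combinations(xs, 2) in itertools' order (hand-ported; PySem has permutations only)
def pyCombinations2 : List Int → List (Int × Int)
  | [] => []
  | x :: xs => xs.map (fun y => (x, y)) ++ pyCombinations2 xs

-- int(s, 2): exact for the nonempty '0'/'1' strings this function builds (hand-ported:
-- PySem.Int.ofStrBase? exists but is defined through private helpers the proofs cannot unfold)
def pyIntBase2 (s : String) : Int :=
  s.toList.foldl (fun a c => 2 * a + (if c = '1' then 1 else 0)) 0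

def getBitMasksFromCombinations (totalBits : Int) : List Int :=
  let combinationIdxs := pyCombinations2 (PySem.List.pyRange 0 totalBits 1)
  combinationIdxs.foldl (fun bitMasks p =>
    let singlebit := List.replicate totalBits.toNat "0"   -- ["0"] * totalBits ([] when totalBits ≤ 0)
    let singlebit := singlebit.set p.1.toNat "1"          -- singlebit[idx1] = "1" (idx1 ∈ range(totalBits), so 0 ≤ idx1 < totalBits)
    let singlebit := singlebit.set p.2.toNat "1"          -- singlebit[idx2] = "1"
    let singlebitStr := PySem.Str.join "" singlebit       -- "".join(singlebit)
    let numFromBits := pyIntBase2 singlebitStr            -- int(singlebitStr, 2)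
    bitMasks ++ [numFromBits]) []

-- ===== PORT B =====
def getBitMasksFromCombinations_alt (totalBits : Int) : List Int :=
  (PySem.List.pyRange (totalBits - 1) 0 (-1)).foldl (fun bitMasks p =>
    (PySem.List.pyRange (p - 1) (-1) (-1)).foldl (fun bitMasks q =>
      bitMasks ++ [((1:Int) <<< p.toNat) + ((1:Int) <<< q.toNat)]) bitMasks) []
      -- p, q ∈ range(totalBits-1, …, -1) are nonnegative, so .toNat is exact

-- ===== PRECONDITION & SPEC =====
def Spec_getBitMasksFromCombinations (totalBits : Int) (out : List Int) : Prop := out = getBitMasksFromCombinations_alt totalBits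
instance (totalBits : Int) (out : List Int) : Decidable (Spec_getBitMasksFromCombinations totalBits out) := by unfold Spec_getBitMasksFromCombinations; infer_instance

-- ===== CLAIM (what is proved, stated in full; the proofs are below) =====
def Claim_equal_getBitMasksFromCombinations : Prop := ∀ (totalBits : Int), Dom_getBitMasksFromCombinations totalBits → Spec_getBitMasksFromCombinations totalBits (getBitMasksFromCombinations totalBits)

-- ===== LEMMAS AND PROOFS =====

-- Nat-level mirror of A's pair enumeration (proof helper)
def combos2N : List Nat → List (Nat × Nat)
  | [] => []
  | x :: xs => xs.map (fun y => (x, y)) ++ combos2N xs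

-- the common normal form: blocks of two-bit values, high bit descending
def pvBlock (n : Nat) : List Int := (List.range n).map (fun q => (2:Int)^n + 2^(n-1-q))

def pvG : Nat → List Int
  | 0 => []
  | n+1 => pvBlock n ++ pvG n

-- ---- A-side: the port equals pvG ----
theorem combos2_map_cast (l : List Nat) :
    pyCombinations2 (l.map (fun (k : Nat) => (k : Int))) =
      (combos2N l).map (fun p => ((p.1 : Int), (p.2 : Int))) := by
  induction l with
  | nil => rfl
  | cons x xs ih =>
      simp only [List.map_cons, pyCombinations2, combos2N, List.map_append, List.map_map, ih]
      rfl

theorem combos2N_map_succ (l : List Nat) :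
    combos2N (l.map Nat.succ) = (combos2N l).map (fun p => (p.1 + 1, p.2 + 1)) := by
  induction l with
  | nil => rfl
  | cons x xs ih => simp [combos2N, ih, Nat.succ_eq_add_one]

theorem combos2N_sorted (l : List Nat) (hl : l.Pairwise (· < ·)) :
    ∀ p ∈ combos2N l, p.1 < p.2 ∧ p.2 ∈ l := by
  induction l with
  | nil => simp [combos2N]
  | cons x xs ih =>
    intro p hp
    rcases List.mem_append.1 hp with h | h
    · obtain ⟨y, hy, rfl⟩ := List.mem_map.1 h
      exact ⟨(List.pairwise_cons.1 hl).1 y hy, List.mem_cons_of_mem _ hy⟩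
    · have := ih (List.pairwise_cons.1 hl).2 p h
      exact ⟨this.1, List.mem_cons_of_mem _ this.2⟩

theorem mem_combos2N_range (n : Nat) (p : Nat × Nat) (hp : p ∈ combos2N (List.range n)) :
    p.1 < p.2 ∧ p.2 < n := by
  have := combos2N_sorted (List.range n) (List.pairwise_lt_range) p hp
  exact ⟨this.1, List.mem_range.1 this.2⟩

theorem set_replicate (i n : Nat) (h : i < n) (c x : Char) :
    (List.replicate n c).set i x = List.replicate i c ++ x :: List.replicate (n-1-i) c := by
  induction i generalizing n with
  | zero =>
    obtain ⟨m, rfl⟩ := Nat.exists_eq_add_of_lt h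
    simp [List.replicate_succ]
  | succ i ih =>
    obtain ⟨m, rfl⟩ : ∃ m, n = m + 1 := ⟨n - 1, by omega⟩
    simp [List.replicate_succ, ih m (by omega)]
    omega

theorem foldl_bin_replicate (k : Nat) (a : Int) :
    (List.replicate k '0').foldl (fun a c => 2 * a + (if c = '1' then 1 else 0)) a = a * 2^k := by
  induction k generalizing a with
  | zero => simp
  | succ k ih => simp [List.replicate_succ, ih, pow_succ]; ring

theorem parse_pair (n i j : Nat) (hij : i < j) (hjn : j < n) :
    (((List.replicate n '0').set i '1').set j '1').foldl
        (fun a c => 2 * a + (if c = '1' then 1 else 0)) (0 : Int)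
      = 2^(n-1-i) + 2^(n-1-j) := by
  rw [set_replicate i n (hij.trans hjn)]
  rw [show (List.replicate i '0' ++ '1' :: List.replicate (n-1-i) '0')
        = (List.replicate i '0' ++ ['1']) ++ List.replicate (n-1-i) '0' by simp]
  rw [List.set_append_right _ _ (by simp; omega)]
  have hlen : j - (List.replicate i '0' ++ ['1']).length = j - i - 1 := by simp; omega
  rw [hlen, set_replicate (j-i-1) (n-1-i) (by omega)]
  have h2 : n - 1 - i - 1 - (j - i - 1) = n - 1 - j := by omega
  rw [h2]
  rw [List.foldl_append, List.foldl_append, List.foldl_append, foldl_bin_replicate,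
      List.foldl_cons, List.foldl_cons, foldl_bin_replicate, foldl_bin_replicate]
  have h3 : n - 1 - i = (j - i - 1) + 1 + (n - 1 - j) := by omega
  rw [h3]
  simp [pow_add, pow_succ]; ring

theorem intercalate_nil_flatten (xss : List (List Char)) : List.intercalate [] xss = xss.flatten := by
  induction xss with
  | nil => rfl
  | cons x xss ih =>
    cases xss with
    | nil => simp [List.intercalate]
    | cons y r =>
      simp only [List.intercalate, List.intersperse] at ih ⊢
      simp [List.flatten] at ih ⊢
      exact ih

theorem flatten_singletons (l : List Char) : (l.map (fun c => [c])).flatten = l := by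
  induction l with
  | nil => rfl
  | cons x xs ih => simp [ih]

theorem body_value (n i j : Nat) (hij : i < j) (hjn : j < n) :
    pyIntBase2 (PySem.Str.join "" (((List.replicate n "0").set i "1").set j "1"))
      = (2:Int)^(n-1-i) + 2^(n-1-j) := by
  rw [pyIntBase2, PySem.Str.join.eq_1, PySem.Chars.join.eq_1]
  have hm : List.map String.toList (((List.replicate n "0").set i "1").set j "1")
      = (((List.replicate n '0').set i '1').set j '1').map (fun c => [c]) := by
    simp [List.map_set, List.map_replicate]
  rw [hm, show "".toList = ([] : List Char) from rfl, intercalate_nil_flatten, flatten_singletons]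
  have : (String.ofList (((List.replicate n '0').set i '1').set j '1')).toList
      = ((List.replicate n '0').set i '1').set j '1' := by simp
  rw [this, parse_pair n i j hij hjn]

theorem A_eq_map (n : Nat) :
    getBitMasksFromCombinations (n : Int) =
      (combos2N (List.range n)).map (fun p => (2:Int)^(n-1-p.1) + 2^(n-1-p.2)) := by
  simp only [getBitMasksFromCombinations]
  rw [show PySem.List.pyRange 0 (n : Int) 1 = (List.range n).map (fun (k : Nat) => (k : Int)) from
        PySem.List.pyRange_zero_natCast n,
      combos2_map_cast]
  refine (PySem.List.foldl_append_singleton_eq_map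
        (fun (p : Int × Int) => pyIntBase2 (PySem.Str.join ""
          (((List.replicate ((n:Int)).toNat "0").set p.1.toNat "1").set p.2.toNat "1"))) _ _).trans ?_
  rw [List.map_map, List.nil_append]
  refine List.map_congr_left ?_
  intro p hp
  obtain ⟨h1, h2⟩ := mem_combos2N_range n p hp
  simp only [Function.comp]
  rw [show ((p.1 : Int)).toNat = p.1 from Int.toNat_natCast _,
      show ((p.2 : Int)).toNat = p.2 from Int.toNat_natCast _,
      show ((n : Int)).toNat = n from Int.toNat_natCast _]
  exact body_value n p.1 p.2 h1 h2

theorem H_eq_G (n : Nat) :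
    (combos2N (List.range n)).map (fun p => (2:Int)^(n-1-p.1) + 2^(n-1-p.2)) = pvG n := by
  induction n with
  | zero => rfl
  | succ n ih =>
    rw [List.range_succ_eq_map]
    show ((List.map Nat.succ (List.range n)).map (fun y => (0, y))
        ++ combos2N (List.map Nat.succ (List.range n))).map _ = _
    rw [combos2N_map_succ, List.map_append, List.map_map, List.map_map, List.map_map, pvG]
    congr 1
    · rw [pvBlock]
      refine List.map_congr_left ?_
      intro q hq
      simp only [Function.comp]
      congr 1 <;> congr 1 <;> omega
    · rw [← ih]
      refine List.map_congr_left ?_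
      intro p hp
      simp only [Function.comp]
      congr 1 <;> congr 1 <;> omega

-- ---- B-side: the port equals pvG ----
theorem desc_nil (a b : Int) (h : a ≤ b) : PySem.List.pyRange a b (-1) = [] := by
  have := PySem.List.length_pyRange_neg_one a b
  rw [show (a - b).toNat = 0 by omega] at this
  exact List.eq_nil_of_length_eq_zero this

theorem alt_flat (t : Int) :
    getBitMasksFromCombinations_alt t =
      (PySem.List.pyRange (t - 1) 0 (-1)).flatMap (fun p =>
        (PySem.List.pyRange (p - 1) (-1) (-1)).map (fun q =>
          ((1:Int) <<< p.toNat) + ((1:Int) <<< q.toNat))) := by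
  rw [getBitMasksFromCombinations_alt]
  have hb : (fun (bitMasks : List Int) (p : Int) =>
      (PySem.List.pyRange (p - 1) (-1) (-1)).foldl (fun bitMasks q =>
        bitMasks ++ [((1:Int) <<< p.toNat) + ((1:Int) <<< q.toNat)]) bitMasks)
      = fun bitMasks p => bitMasks ++ (PySem.List.pyRange (p - 1) (-1) (-1)).map (fun q =>
          ((1:Int) <<< p.toNat) + ((1:Int) <<< q.toNat)) := by
    funext bitMasks p
    exact PySem.List.foldl_append_singleton_eq_map _ _ _
  rw [hb, PySem.List.foldl_append_eq_flatMap, List.nil_append]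

theorem descIdx (n : Nat) :
    PySem.List.pyRange ((n:Int) - 1) (-1) (-1)
      = (List.range n).map (fun q => ((n-1-q : Nat) : Int)) := by
  induction n with
  | zero => exact desc_nil _ _ (by omega)
  | succ n ih =>
    rw [show ((n+1 : Nat) : Int) - 1 = (n : Int) by push_cast; ring,
        PySem.List.pyRange_neg_one_cons (by omega : (-1:Int) < (n:Int))]
    rw [show (n : Int) - 1 = ((n:Nat) : Int) - 1 from rfl, ih]
    rw [List.range_succ_eq_map]
    simp only [List.map_cons, List.map_map]
    congr 1
    refine List.map_congr_left fun q hq => ?_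
    simp only [Function.comp]
    congr 1
    omega

theorem block_eq (n : Nat) :
    (PySem.List.pyRange ((n:Int) - 1) (-1) (-1)).map (fun q =>
        ((1:Int) <<< ((n:Int)).toNat) + ((1:Int) <<< q.toNat)) = pvBlock n := by
  rw [descIdx n, List.map_map, pvBlock]
  refine List.map_congr_left ?_
  intro q hq
  simp only [Function.comp, Int.toNat_natCast]
  rw [Int.shiftLeft_eq_mul_pow, Int.shiftLeft_eq]
  push_cast
  ring

theorem B_eq (n : Nat) : getBitMasksFromCombinations_alt (n : Int) = pvG n := by
  induction n with
  | zero =>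
    rw [alt_flat, desc_nil _ _ (by omega)]
    rfl
  | succ n ih =>
    rcases Nat.eq_zero_or_pos n with h0 | h0
    · subst h0; decide
    · rw [alt_flat, show ((n+1 : Nat) : Int) - 1 = (n : Int) by push_cast; ring,
          PySem.List.pyRange_neg_one_cons (by omega : (0:Int) < (n:Int)),
          List.flatMap_cons, pvG]
      congr 1
      · exact block_eq n
      · rw [← alt_flat ((n:Int)), ih]

-- ===== VERDICT (by name: the statement is the Claim_ definition above) =====
theorem getBitMasksFromCombinations_spec : Claim_equal_getBitMasksFromCombinations := by
  intro t _
  show getBitMasksFromCombinations t = getBitMasksFromCombinations_alt t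
  by_cases ht : t < 2
  · have hB : getBitMasksFromCombinations_alt t = [] := by
      rw [alt_flat, desc_nil _ _ (by omega : t - 1 ≤ 0)]
      rfl
    rw [hB]
    by_cases ht0 : t ≤ 0
    · simp [getBitMasksFromCombinations, PySem.List.pyRange_one_eq_nil ht0, pyCombinations2]
    · have h1 : t = 1 := by omega
      subst h1
      decide
  · obtain ⟨n, rfl⟩ : ∃ n : Nat, t = (n : Int) := ⟨t.toNat, by omega⟩
    rw [A_eq_map n, H_eq_G n, B_eq n]
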